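-- pv_equiv track=rewrite | github.com/citceae/DSL | lxy/transfer.py | treetoarr2
-- ===== SOURCE A (Python) =====
-- def treetoarr2(s1,dict2):#将字符串常量视为同一个参数
--     outarr = []
--     l1 = len(s1)
--     i=0
--     j=0
--     while j < l1:
--         if s1[j] != '(' and s1[j]!=')' and s1[j]!=',':
--             j = j+1
--         else:
--             if i==j:
--                 outarr.append(-1)
--                 j=j+1
--                 i=j
--                 continue
--             tmp = s1[i:j]
--             if '"' in tmp:
--                 tmp = 'StringConst'
--             if tmp in dict2:
--                 pass
--             else:
--                 num = len(dict2)
--                 dict2[tmp] = num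
--             val = dict2[tmp]
--             outarr.append(val)
--             if s1[j]!='(':
--                 outarr.append(-1)
--             j=j+1
--             i=j
--     return outarr,dict2
-- ===== SOURCE B (Python) =====
-- def treetoarr2(s1, dict2):
--     # Phase 1: tokenize into (text, delimiter) pairs; trailing text with no
--     # following delimiter is dropped (the original never emits it either).
--     segs = []
--     cur = []
--     for ch in s1:
--         if ch in '(),':
--             segs.append((''.join(cur), ch))
--             cur = []
--         else:
--             cur.append(ch)
--     # Phase 2: emit codes.
--     outarr = []
--     for text, delim in segs:
--         if text == '':
--             outarr.append(-1)
--         else: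
--             tmp = 'StringConst' if '"' in text else text
--             if tmp not in dict2:
--                 dict2[tmp] = len(dict2)
--             outarr.append(dict2[tmp])
--             if delim != '(':
--                 outarr.append(-1)
--     return outarr, dict2
-- ===== Notes on version B (the rewrite author's own statement) =====
-- stated objective: faster
-- what changed: Replaces A's index-based while loop with per-character comparisons and s1[i:j] slicing by a two-phase decomposition: tokenize the string into (text, delimiter) pairs first, then a separate emission pass over those pairs.
import Mathlib
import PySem

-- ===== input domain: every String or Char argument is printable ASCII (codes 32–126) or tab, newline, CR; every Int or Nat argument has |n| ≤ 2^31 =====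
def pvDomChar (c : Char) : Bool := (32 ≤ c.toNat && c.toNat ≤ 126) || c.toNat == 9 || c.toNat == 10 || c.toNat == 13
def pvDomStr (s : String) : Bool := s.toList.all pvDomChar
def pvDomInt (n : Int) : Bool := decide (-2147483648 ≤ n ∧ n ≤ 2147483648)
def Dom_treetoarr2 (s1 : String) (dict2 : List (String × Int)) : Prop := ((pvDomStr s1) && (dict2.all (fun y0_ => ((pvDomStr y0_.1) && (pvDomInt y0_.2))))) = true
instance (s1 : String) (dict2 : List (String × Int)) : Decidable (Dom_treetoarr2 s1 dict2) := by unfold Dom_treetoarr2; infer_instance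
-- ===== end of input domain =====

-- B re-implements A's single index/slice scan as a two-phase tokenize-then-emit pass (objective: alternative).
-- Both Pythons mutate dict2 in place identically; the proved equivalence is about the returned pair (which contains dict2).

-- ===== PORT A =====
-- A's while loop: state (dict2, outarr, i, j); fuel = cs.length - j (j grows by 1 each iteration).
def loopA_tta2 (cs : List Char) (d : PySem.Dict String Int) (outarr : List Int)
    (i j : Nat) : (fuel : Nat) → List Int × PySem.Dict String Int
  | 0 => (outarr, d)
  | fuel + 1 =>
    if j < cs.length then
      let c := cs.getD j ' '
      if c ≠ '(' ∧ c ≠ ')' ∧ c ≠ ',' then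
        loopA_tta2 cs d outarr i (j + 1) fuel
      else if i = j then
        loopA_tta2 cs d (outarr ++ [-1]) (j + 1) (j + 1) fuel
      else
        let tmp0 := String.mk ((cs.drop i).take (j - i))     -- s1[i:j]
        let tmp := if tmp0.toList.contains '"' then "StringConst" else tmp0
        let d := if d.contains tmp then d else d.insert tmp (d.size : Int)
        let val := d.getD tmp 0
        let outarr := outarr ++ [val]
        let outarr := if c ≠ '(' then outarr ++ [-1] else outarr
        loopA_tta2 cs d outarr (j + 1) (j + 1) fuel
    else (outarr, d)

def treetoarr2 (s1 : String) (dict2 : List (String × Int)) : List Int × (List (String × Int)) :=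
  let cs := s1.toList
  let r := loopA_tta2 cs (PySem.Dict.mk dict2) [] 0 0 cs.length
  (r.1, r.2.items)

-- ===== PORT B =====
-- Phase 1 of Source B: split into (text, delimiter) pairs; trailing text without a delimiter is dropped.
def segs_tta2 (cur : List Char) : List Char → List (List Char × Char)
  | [] => []
  | c :: rest =>
    if c = '(' ∨ c = ')' ∨ c = ',' then (cur, c) :: segs_tta2 [] rest
    else segs_tta2 (cur ++ [c]) rest

-- Phase 2 of Source B: the body of the emission loop, folded over the pairs.
def emit_tta2 (st : List Int × PySem.Dict String Int) (p : List Char × Char) :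
    List Int × PySem.Dict String Int :=
  if p.1 = [] then (st.1 ++ [-1], st.2)
  else
    let text := String.mk p.1
    let tmp := if text.toList.contains '"' then "StringConst" else text
    let d := if st.2.contains tmp then st.2 else st.2.insert tmp (st.2.size : Int)
    let out := st.1 ++ [d.getD tmp 0]
    let out := if p.2 ≠ '(' then out ++ [-1] else out
    (out, d)

def treetoarr2_alt (s1 : String) (dict2 : List (String × Int)) : List Int × (List (String × Int)) :=
  let r := (segs_tta2 [] s1.toList).foldl emit_tta2 ([], PySem.Dict.mk dict2)
  (r.1, r.2.items)

-- ===== PRECONDITION & SPEC =====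
def Spec_treetoarr2 (s1 : String) (dict2 : List (String × Int)) (out : List Int × (List (String × Int))) : Prop := out = treetoarr2_alt s1 dict2
instance (s1 : String) (dict2 : List (String × Int)) (out : List Int × (List (String × Int))) : Decidable (Spec_treetoarr2 s1 dict2 out) := by unfold Spec_treetoarr2; infer_instance

-- ===== CLAIM (what is proved, stated in full; the proofs are below) =====
def Claim_equal_treetoarr2 : Prop := ∀ (s1 : String) (dict2 : List (String × Int)), Dom_treetoarr2 s1 dict2 → Spec_treetoarr2 s1 dict2 (treetoarr2 s1 dict2)

-- ===== LEMMAS AND PROOFS =====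

-- The loop invariant: at state (i, j) with the scanned token cur between them,
-- A's loop on pre ++ cur ++ rest equals B's fold over the segments of rest seeded with cur.
theorem loopA_tta2_eq_fold (rest : List Char) : ∀ (pre cur : List Char)
    (d : PySem.Dict String Int) (out : List Int),
    loopA_tta2 (pre ++ cur ++ rest) d out pre.length (pre.length + cur.length) rest.length
      = (segs_tta2 cur rest).foldl emit_tta2 (out, d) := by
  induction rest with
  | nil =>
    intro pre cur d out
    simp [loopA_tta2, segs_tta2]
  | cons c rest ih =>
    intro pre cur d out
    have hlen : pre.length + cur.length < (pre ++ cur ++ c :: rest).length := by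
      simp
    have hget : (pre ++ cur ++ c :: rest).getD (pre.length + cur.length) ' ' = c := by
      simp
    have htok : ((pre ++ cur ++ c :: rest).drop pre.length).take (pre.length + cur.length - pre.length) = cur := by
      rw [List.append_assoc, List.drop_append_of_le_length (le_refl _)]
      simp
    have key : ∀ (d' : PySem.Dict String Int) (out' : List Int),
        loopA_tta2 (pre ++ cur ++ c :: rest) d' out'
            (pre.length + cur.length + 1) (pre.length + cur.length + 1) rest.length
          = (segs_tta2 [] rest).foldl emit_tta2 (out', d') := by
      intro d' out'
      have := ih (pre ++ cur ++ [c]) [] d' out'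
      simp only [List.append_nil, List.length_append, List.length_cons, List.length_nil] at this
      simpa [List.append_assoc] using this
    simp only [List.length_cons]
    by_cases hdelim : c = '(' ∨ c = ')' ∨ c = ','
    · -- delimiter
      by_cases hcur : cur = []
      · subst hcur
        rw [loopA_tta2]
        rw [if_pos hlen, hget]
        rw [if_neg (by tauto), if_pos (by simp)]
        rw [segs_tta2, if_pos hdelim, List.foldl_cons]
        have hemit : emit_tta2 (out, d) ([], c) = (out ++ [-1], d) := by
          simp [emit_tta2]
        rw [hemit]
        simpa using key d (out ++ [-1])
      · have hij : ¬ (pre.length = pre.length + cur.length) := by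
          intro h
          exact hcur (List.length_eq_zero_iff.mp (by omega))
        rw [loopA_tta2]
        rw [if_pos hlen, hget]
        rw [if_neg (by tauto), if_neg hij]
        simp only [htok]
        rw [segs_tta2, if_pos hdelim, List.foldl_cons, emit_tta2]
        simp only [if_neg hcur]
        exact key _ _
    · -- ordinary character: extend cur
      rw [loopA_tta2]
      rw [if_pos hlen, hget]
      rw [if_pos (by tauto)]
      rw [segs_tta2, if_neg hdelim]
      have := ih pre (cur ++ [c]) d out
      simp only [List.length_append, List.length_cons, List.length_nil] at this
      simpa [List.append_assoc, Nat.add_assoc] using this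

-- ===== VERDICT (by name: the statement is the Claim_ definition above) =====
theorem treetoarr2_spec : Claim_equal_treetoarr2 := by
  intro s1 dict2 _
  unfold Spec_treetoarr2 treetoarr2 treetoarr2_alt
  have := loopA_tta2_eq_fold s1.toList [] [] (PySem.Dict.mk dict2) []
  simp only [List.nil_append, List.length_nil, Nat.add_zero] at this
  simp only [this]
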